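-- pv_equiv track=rewrite | github.com/YaqoubB/Python-Programming-MOOC-2021 | part05/part05-23_create_tuple/src/create_tuple.py | create_tuple
-- ===== SOURCE A (Python) =====
-- def create_tuple(x: int, y: int, z: int):
--     list_1 = [x, y, z]
--     list_1.sort()
--     sum = 0
--     for i in list_1:
--         sum += i
--     x = list_1[0]
--     y = list_1[-1]
--     z = sum
--     tuple_1 = (x, y, z)
--     return tuple_1
-- ===== SOURCE B (Python) =====
-- def create_tuple(x: int, y: int, z: int):
--     return (min(x, y, z), max(x, y, z), x + y + z)
-- ===== Notes on version B (the rewrite author's own statement) =====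
-- stated objective: idiomatic
-- what changed: Replaces sort-then-index extremum selection and the explicit accumulation loop with direct min/max built-ins and a closed-form sum, returned in one statement.
import Mathlib
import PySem

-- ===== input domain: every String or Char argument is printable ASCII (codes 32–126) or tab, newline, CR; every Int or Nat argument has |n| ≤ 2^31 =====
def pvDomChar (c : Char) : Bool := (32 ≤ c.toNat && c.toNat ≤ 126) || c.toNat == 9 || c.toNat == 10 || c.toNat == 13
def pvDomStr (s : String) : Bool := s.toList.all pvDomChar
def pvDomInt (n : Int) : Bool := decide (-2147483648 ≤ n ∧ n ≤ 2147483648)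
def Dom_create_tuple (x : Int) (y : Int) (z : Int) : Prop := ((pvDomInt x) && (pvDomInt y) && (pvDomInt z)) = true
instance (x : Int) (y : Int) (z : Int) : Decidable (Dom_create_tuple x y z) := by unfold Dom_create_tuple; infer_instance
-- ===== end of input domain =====

-- B replaces the sort-then-index extremum selection and the accumulation loop with direct min/max and a closed-form sum (idiomatic, same cost).

-- ===== PORT A =====
-- list_1 = [x,y,z]; list_1.sort(); sum via loop; list_1[0], list_1[-1].
-- The indexings always succeed (length 3), so .getD 0 is never the default.
def create_tuple (x : Int) (y : Int) (z : Int) : Int × Int × Int :=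
  let list_1 := PySem.List.sorted [x, y, z] (fun a => a) false
  let sum := list_1.foldl (fun s i => s + i) 0
  let x' := (PySem.List.pyGet? list_1 0).getD 0
  let y' := (PySem.List.pyGet? list_1 (-1)).getD 0
  (x', y', sum)

-- ===== PORT B =====
def create_tuple_alt (x : Int) (y : Int) (z : Int) : Int × Int × Int :=
  (min x (min y z), max x (max y z), x + y + z)

-- ===== PRECONDITION & SPEC =====
def Spec_create_tuple (x : Int) (y : Int) (z : Int) (out : Int × Int × Int) : Prop := out = create_tuple_alt x y z
instance (x : Int) (y : Int) (z : Int) (out : Int × Int × Int) : Decidable (Spec_create_tuple x y z out) := by unfold Spec_create_tuple; infer_instance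

-- ===== CLAIM (what is proved, stated in full; the proofs are below) =====
def Claim_equal_create_tuple : Prop := ∀ (x : Int) (y : Int) (z : Int), Dom_create_tuple x y z → Spec_create_tuple x y z (create_tuple x y z)

-- ===== LEMMAS AND PROOFS =====
-- sorted [x,y,z] named explicitly: its head is the min, its last the max, and it sums to x+y+z.
theorem sorted3 (x y z : Int) :
    ∃ a b c, PySem.List.sorted [x, y, z] (fun v => v) false = [a, b, c] ∧
      a = min x (min y z) ∧ c = max x (max y z) ∧ 0 + a + b + c = x + y + z := by
  rcases le_total x y with h1 | h1 <;> rcases le_total y z with h2 | h2 <;>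
    rcases le_total x z with h3 | h3
  · exact ⟨x, y, z, PySem.List.sorted_id_eq_of_perm_of_pairwise _ _ (List.Perm.refl _)
      (by simp [List.pairwise_cons]; omega), by omega, by omega, by omega⟩
  · exact ⟨x, y, z, PySem.List.sorted_id_eq_of_perm_of_pairwise _ _ (List.Perm.refl _)
      (by simp [List.pairwise_cons]; omega), by omega, by omega, by omega⟩
  · exact ⟨x, z, y, PySem.List.sorted_id_eq_of_perm_of_pairwise _ _
      (List.Perm.cons _ (List.Perm.swap _ _ _))
      (by simp [List.pairwise_cons]; omega), by omega, by omega, by omega⟩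
  · exact ⟨z, x, y, PySem.List.sorted_id_eq_of_perm_of_pairwise _ _
      ((List.Perm.swap _ _ _).trans (List.Perm.cons _ (List.Perm.swap _ _ _)))
      (by simp [List.pairwise_cons]; omega), by omega, by omega, by omega⟩
  · exact ⟨y, x, z, PySem.List.sorted_id_eq_of_perm_of_pairwise _ _ (List.Perm.swap _ _ _)
      (by simp [List.pairwise_cons]; omega), by omega, by omega, by omega⟩
  · exact ⟨y, z, x, PySem.List.sorted_id_eq_of_perm_of_pairwise _ _
      ((List.Perm.cons _ (List.Perm.swap _ _ _)).trans (List.Perm.swap _ _ _))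
      (by simp [List.pairwise_cons]; omega), by omega, by omega, by omega⟩
  · exact ⟨z, y, x, PySem.List.sorted_id_eq_of_perm_of_pairwise _ _
      ((List.Perm.swap _ _ _).trans ((List.Perm.cons _ (List.Perm.swap _ _ _)).trans
        (List.Perm.swap _ _ _)))
      (by simp [List.pairwise_cons]; omega), by omega, by omega, by omega⟩
  · exact ⟨z, y, x, PySem.List.sorted_id_eq_of_perm_of_pairwise _ _
      ((List.Perm.swap _ _ _).trans ((List.Perm.cons _ (List.Perm.swap _ _ _)).trans
        (List.Perm.swap _ _ _)))
      (by simp [List.pairwise_cons]; omega), by omega, by omega, by omega⟩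

theorem create_tuple_eq_alt (x y z : Int) : create_tuple x y z = create_tuple_alt x y z := by
  obtain ⟨a, b, c, hs, ha, hc, hsum⟩ := sorted3 x y z
  unfold create_tuple create_tuple_alt
  simp only [hs, List.foldl, PySem.List.pyGet?, PySem.List.pyIdx?]
  simp [Prod.ext_iff]
  omega

-- ===== VERDICT (by name: the statement is the Claim_ definition above) =====
theorem create_tuple_spec : Claim_equal_create_tuple := by
  intro x y z _
  exact create_tuple_eq_alt x y z
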